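-- pv_equiv track=rewrite | github.com/pierrebiver/spotify-puzzle | reverse_binary_number/reverse_binary_number.py | binary_to_number
-- ===== SOURCE A (Python) =====
-- def binary_to_number(binary_number: int):
--     decimal = 0
--     for i in str(binary_number):
--         if i == '1':
--             decimal = decimal * 2 + 1
--         else:
--             decimal = decimal * 2
--
--     return decimal
-- ===== SOURCE B (Python) =====
-- def binary_to_number(binary_number: int):
--     result = 0
--     power = 1
--     for ch in reversed(str(binary_number)):
--         if ch == '1':
--             result += power
--         power *= 2
--     return result
-- ===== Notes on version B (the rewrite author's own statement) =====
-- stated objective: alternative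
-- what changed: Replaces MSB-first Horner accumulation (decimal = decimal*2 + bit) with an LSB-first scan of the reversed digit string maintaining a running power of two added when the character is '1'.
import Mathlib
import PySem

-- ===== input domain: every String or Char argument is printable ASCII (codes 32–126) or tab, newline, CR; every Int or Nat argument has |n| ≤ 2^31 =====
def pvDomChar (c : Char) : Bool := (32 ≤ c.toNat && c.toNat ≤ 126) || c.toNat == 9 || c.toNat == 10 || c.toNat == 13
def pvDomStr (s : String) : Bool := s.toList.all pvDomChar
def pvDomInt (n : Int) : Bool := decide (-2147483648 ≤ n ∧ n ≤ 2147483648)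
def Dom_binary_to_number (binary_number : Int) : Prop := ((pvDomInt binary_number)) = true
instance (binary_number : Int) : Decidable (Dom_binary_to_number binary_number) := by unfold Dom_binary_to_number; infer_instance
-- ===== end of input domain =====

-- ===== PORT A =====
-- B interprets the decimal digits of the int as binary LSB-first with a running power of two, instead of A's MSB-first Horner loop.
def binary_to_number (binary_number : Int) : Int :=
  (PySem.Int.toStr binary_number).toList.foldl
    (fun decimal i => if i = '1' then decimal * 2 + 1 else decimal * 2) 0

-- ===== PORT B =====
def binary_to_number_alt (binary_number : Int) : Int :=
  ((PySem.Int.toStr binary_number).toList.reverse.foldl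
    (fun (st : Int × Int) ch => (if ch = '1' then st.1 + st.2 else st.1, st.2 * 2)) (0, 1)).1

-- ===== PRECONDITION & SPEC =====
def Spec_binary_to_number (binary_number : Int) (out : Int) : Prop := out = binary_to_number_alt binary_number
instance (binary_number : Int) (out : Int) : Decidable (Spec_binary_to_number binary_number out) := by unfold Spec_binary_to_number; infer_instance

-- ===== CLAIM (what is proved, stated in full; the proofs are below) =====
def Claim_equal_binary_to_number : Prop := ∀ (binary_number : Int), Dom_binary_to_number binary_number → Spec_binary_to_number binary_number (binary_to_number binary_number)

-- ===== LEMMAS AND PROOFS =====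

-- B's reverse fold computes (Horner value of the reversed-back list scaled by p plus r, p * 2^len).
theorem altFold_eq (m : List Char) : ∀ (r p : Int),
    m.foldl (fun (st : Int × Int) ch => (if ch = '1' then st.1 + st.2 else st.1, st.2 * 2)) (r, p)
      = (r + p * m.reverse.foldl (fun decimal i => if i = '1' then decimal * 2 + 1 else decimal * 2) 0,
         p * 2 ^ m.length) := by
  induction m with
  | nil => intro r p; simp
  | cons c m ih =>
    intro r p
    simp only [List.foldl_cons, ih, List.reverse_cons, List.foldl_append, List.foldl_cons,
      List.foldl_nil, List.length_cons]
    by_cases h : c = '1' <;>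
      simp [h, mul_add, mul_assoc, mul_comm, pow_succ] <;> ring

-- ===== VERDICT (by name: the statement is the Claim_ definition above) =====
theorem binary_to_number_spec : Claim_equal_binary_to_number := by
  intro n _
  unfold Spec_binary_to_number binary_to_number binary_to_number_alt
  rw [altFold_eq]
  simp
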